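-- pv_equiv track=rewrite | github.com/TheDaniel166/IsopGem | src/pillars/geometry/ui/advanced_scientific_calculator_window.py | _int_from_base
-- ===== SOURCE A (Python) =====
-- BASE_DIGITS = "0123456789ABCDEFGHIJKLMNOPQRSTUVWXYZ"
--
-- def _int_from_base(s: str, base: int) -> int:
--     """Convert a string in the given base to an integer."""
--     s = s.strip().upper()
--     if not s:
--         raise ValueError("Empty input")
--     negative = s.startswith("-")
--     if negative:
--         s = s[1:]
--     result = 0
--     for char in s:
--         if char not in BASE_DIGITS[:base]:
--             raise ValueError(f"Invalid digit '{char}' for base {base}")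
--         result = result * base + BASE_DIGITS.index(char)
--     return -result if negative else result
-- ===== SOURCE B (Python) =====
-- BASE_DIGITS = "0123456789ABCDEFGHIJKLMNOPQRSTUVWXYZ"
--
-- def _int_from_base(s: str, base: int) -> int:
--     """Convert a string in the given base to an integer (validate-then-expand)."""
--     s = s.strip().upper()
--     if not s:
--         raise ValueError("Empty input")
--     negative = s.startswith("-")
--     digits = s[1:] if negative else s
--     lookup = {c: i for i, c in enumerate(BASE_DIGITS[:base])}
--     values = []
--     for char in digits:
--         if char not in lookup:
--             raise ValueError(f"Invalid digit '{char}' for base {base}")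
--         values.append(lookup[char])
--     total = 0
--     power = 1
--     for v in reversed(values):
--         total += v * power
--         power *= base
--     return -total if negative else total
-- ===== Notes on version B (the rewrite author's own statement) =====
-- stated objective: alternative
-- what changed: Replaces the single Horner accumulator with a separate validate-and-map pass (dict lookup built once from BASE_DIGITS[:base]) followed by positional expansion over the reversed digit values with an explicit running power of base.
import Mathlib
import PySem

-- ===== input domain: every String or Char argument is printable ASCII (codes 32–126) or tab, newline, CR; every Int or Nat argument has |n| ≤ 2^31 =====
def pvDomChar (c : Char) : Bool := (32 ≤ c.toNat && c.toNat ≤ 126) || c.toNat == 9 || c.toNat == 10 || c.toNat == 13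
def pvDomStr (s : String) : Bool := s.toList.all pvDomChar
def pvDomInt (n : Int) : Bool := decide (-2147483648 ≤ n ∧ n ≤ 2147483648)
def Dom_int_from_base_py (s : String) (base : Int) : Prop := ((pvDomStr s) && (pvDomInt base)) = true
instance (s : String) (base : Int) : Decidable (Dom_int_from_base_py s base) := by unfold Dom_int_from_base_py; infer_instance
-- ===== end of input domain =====

-- B replaces A's Horner accumulator by a validate-and-map pass (dict built from BASE_DIGITS[:base])
-- followed by positional expansion over the reversed digit values; same cost, different decomposition.


-- ===== PORT A =====
def pvBaseDigits : List Char := "0123456789ABCDEFGHIJKLMNOPQRSTUVWXYZ".toList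

-- the loop 'for char in s: if char not in BASE_DIGITS[:base]: raise; result = result*base + BASE_DIGITS.index(char)'
-- (none = the ValueError; 'BASE_DIGITS.index(char)' is the first-occurrence index, PySem.List.index?, total under the guard)
def pvHornerA (base : Int) : List Char → Int → Option Int
  | [], r => some r
  | c :: cs, r =>
    if c ∈ PySem.List.slice pvBaseDigits none (some base) then
      pvHornerA base cs (r * base + ((PySem.List.index? pvBaseDigits c).getD 0 : Int))
    else none

def int_from_base_py (s : String) (base : Int) : Int :=
  let t := PySem.Chars.upper (PySem.Chars.strip s.toList)
  if t = [] then 0  -- Python raises ValueError "Empty input"; excluded by Pre_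
  else
    let negative := PySem.Chars.startswith t ['-']
    let t1 := if negative then PySem.List.slice t (some 1) none else t
    match pvHornerA base t1 0 with
    | some r => if negative then -r else r
    | none => 0  -- Python raises ValueError "Invalid digit"; excluded by Pre_

-- ===== PORT B =====
-- lookup = {c: i for i, c in enumerate(BASE_DIGITS[:base])}
def pvLookupB (base : Int) : PySem.Dict Char Int :=
  (PySem.List.enumerate (PySem.List.slice pvBaseDigits none (some base)) 0).foldl
    (fun d p => d.insert p.2 p.1) PySem.Dict.empty

-- the validation/mapping loop building 'values' (none = the ValueError)
def pvValuesB (lk : PySem.Dict Char Int) : List Char → List Int → Option (List Int)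
  | [], acc => some acc
  | c :: cs, acc =>
    match lk.get? c with
    | some v => pvValuesB lk cs (acc ++ [v])
    | none => none

-- 'for v in reversed(values): total += v * power; power *= base'
def pvExpandB (base : Int) : List Int → Int × Int → Int × Int
  | [], st => st
  | v :: vs, (t, p) => pvExpandB base vs (t + v * p, p * base)

def int_from_base_py_alt (s : String) (base : Int) : Int :=
  let t := PySem.Chars.upper (PySem.Chars.strip s.toList)
  if t = [] then 0  -- Python raises ValueError "Empty input"; excluded by Pre_
  else
    let negative := PySem.Chars.startswith t ['-']
    let digits := if negative then PySem.List.slice t (some 1) none else t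
    match pvValuesB (pvLookupB base) digits [] with
    | some vs =>
      let total := (pvExpandB base vs.reverse (0, 1)).1
      if negative then -total else total
    | none => 0  -- Python raises ValueError "Invalid digit"; excluded by Pre_

-- ===== PRECONDITION & SPEC =====
-- Pre_ excludes exactly the inputs where A raises ValueError: an all-whitespace string, or a digit
-- (after the optional leading '-') outside BASE_DIGITS[:base].
def Pre_int_from_base_py (s : String) (base : Int) : Prop :=
  let t := PySem.Chars.upper (PySem.Chars.strip s.toList)
  t ≠ [] ∧ ((if PySem.Chars.startswith t ['-'] then PySem.List.slice t (some 1) none else t).all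
      (fun c => decide (c ∈ PySem.List.slice pvBaseDigits none (some base)))) = true
instance (s : String) (base : Int) : Decidable (Pre_int_from_base_py s base) := by
  unfold Pre_int_from_base_py; infer_instance

def pvWitness_int_from_base_py : String × Int := ("-1F", 16)

def Spec_int_from_base_py (s : String) (base : Int) (out : Int) : Prop := out = int_from_base_py_alt s base
instance (s : String) (base : Int) (out : Int) : Decidable (Spec_int_from_base_py s base out) := by unfold Spec_int_from_base_py; infer_instance

-- ===== CLAIM (what is proved, stated in full; the proofs are below) =====
def Claim_equal_int_from_base_py : Prop := ∀ (s : String) (base : Int), Dom_int_from_base_py s base → Pre_int_from_base_py s base → Spec_int_from_base_py s base (int_from_base_py s base)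

-- ===== LEMMAS AND PROOFS =====

-- BASE_DIGITS[:base] is a prefix (take) of BASE_DIGITS, for every Int base
theorem pvPrefix_eq_take (base : Int) :
    PySem.List.slice pvBaseDigits none (some base)
      = pvBaseDigits.take (PySem.List.clampIdx pvBaseDigits.length base) := rfl

theorem pvPrefix_nodup (base : Int) : (PySem.List.slice pvBaseDigits none (some base)).Nodup := by
  rw [pvPrefix_eq_take]
  exact (by decide : pvBaseDigits.Nodup).sublist (List.take_sublist _ _)

-- index into the full BASE_DIGITS agrees with index into the prefix, for members of the prefix
theorem pvIndex_prefix (base : Int) (c : Char)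
    (hc : c ∈ PySem.List.slice pvBaseDigits none (some base)) :
    PySem.List.index? pvBaseDigits c = PySem.List.index? (PySem.List.slice pvBaseDigits none (some base)) c := by
  conv_lhs => rw [show pvBaseDigits = PySem.List.slice pvBaseDigits none (some base)
      ++ pvBaseDigits.drop (PySem.List.clampIdx pvBaseDigits.length base) from
    by rw [pvPrefix_eq_take]; exact (List.take_append_drop _ _).symm]
  exact PySem.List.index?_append_of_mem _ hc

-- the dict comprehension looks up the first-occurrence index in the prefix
theorem pvLookup_build_get? (P : List Char) (hnd : P.Nodup) (c : Char) :
    ((PySem.List.enumerate P 0).foldl (fun d p => d.insert p.2 p.1) PySem.Dict.empty).get? c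
      = (PySem.List.index? P c).map (fun n => (n : Int)) := by
  induction P using List.reverseRecOn with
  | nil => simp [PySem.List.enumerate, PySem.Dict.get?_empty, PySem.List.index?_eq_idxOf?]
  | append_singleton P x ih =>
    have hndP : P.Nodup := hnd.sublist (List.sublist_append_left _ _)
    have hx : x ∉ P := by
      have h := hnd
      simp [List.nodup_append] at h
      tauto
    rw [PySem.List.enumerate_append, List.foldl_append]
    simp only [PySem.List.enumerate, List.foldl]
    rw [PySem.Dict.get?_insert, ih hndP]
    by_cases hc : c = x
    · subst hc
      rw [PySem.List.index?_append_singleton_self P c hx]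
      simp
    · have : PySem.List.index? (P ++ [x]) c = PySem.List.index? P c := by
        by_cases hm : c ∈ P
        · exact PySem.List.index?_append_of_mem _ hm
        · rw [(PySem.List.index?_eq_none_iff _ _).mpr hm, (PySem.List.index?_eq_none_iff _ _).mpr]
          simp [hm, hc]
      rw [this]
      simp [hc]

theorem pvLookup_get? (base : Int) (c : Char)
    (hc : c ∈ PySem.List.slice pvBaseDigits none (some base)) :
    (pvLookupB base).get? c = some (((PySem.List.index? pvBaseDigits c).getD 0 : Nat) : Int) := by
  rw [pvLookupB, pvLookup_build_get? _ (pvPrefix_nodup base), ← pvIndex_prefix base c hc]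
  cases hi : PySem.List.index? pvBaseDigits c with
  | none =>
    exact absurd (PySem.List.mem_of_mem_slice _ _ _ hc)
      ((PySem.List.index?_eq_none_iff _ _).mp hi)
  | some n => simp

-- A's loop computes the Horner foldl, given validity
theorem pvHornerA_eq (base : Int) (l : List Char) :
    (∀ c ∈ l, c ∈ PySem.List.slice pvBaseDigits none (some base)) →
    ∀ r, pvHornerA base l r
      = some (l.foldl (fun r c => r * base + ((PySem.List.index? pvBaseDigits c).getD 0 : Int)) r) := by
  induction l with
  | nil => intro _ r; rfl
  | cons c cs ih =>
    intro hv r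
    have hc := hv c (List.mem_cons_self)
    simp only [pvHornerA, if_pos hc, List.foldl]
    exact ih (fun d hd => hv d (List.mem_cons_of_mem _ hd)) _

-- B's validation loop returns the mapped digit values, given validity
theorem pvValuesB_eq (base : Int) (l : List Char) :
    (∀ c ∈ l, c ∈ PySem.List.slice pvBaseDigits none (some base)) →
    ∀ acc, pvValuesB (pvLookupB base) l acc
      = some (acc ++ l.map (fun c => ((PySem.List.index? pvBaseDigits c).getD 0 : Int))) := by
  induction l with
  | nil => intro _ acc; simp [pvValuesB]
  | cons c cs ih =>
    intro hv acc
    have hc := hv c (List.mem_cons_self)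
    simp only [pvValuesB, pvLookup_get? base c hc]
    rw [ih (fun d hd => hv d (List.mem_cons_of_mem _ hd))]
    simp

-- B's expansion of the reversed values is the Horner value
theorem pvExpandB_eq (base : Int) (vs : List Int) :
    ∀ t p, (pvExpandB base vs (t, p)).1
      = t + p * (vs.reverse.foldl (fun r v => r * base + v) 0) := by
  induction vs with
  | nil => intro t p; simp [pvExpandB]
  | cons v vs ih =>
    intro t p
    simp only [pvExpandB, List.reverse_cons, List.foldl_append, List.foldl]
    rw [ih]
    ring

-- ===== VERDICT (by name: the statement is the Claim_ definition above) =====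
theorem int_from_base_py_spec : Claim_equal_int_from_base_py := by
  intro s base _ hpre
  obtain ⟨hne, hval⟩ := hpre
  unfold Spec_int_from_base_py int_from_base_py int_from_base_py_alt
  simp only []
  set t := PySem.Chars.upper (PySem.Chars.strip s.toList) with ht
  rw [if_neg hne, if_neg hne]
  set neg := PySem.Chars.startswith t ['-'] with hneg
  set l := if neg then PySem.List.slice t (some 1) none else t with hl
  have hv : ∀ c ∈ l, c ∈ PySem.List.slice pvBaseDigits none (some base) :=
    fun c hc => of_decide_eq_true (List.all_eq_true.mp hval c hc)
  rw [pvHornerA_eq base l hv 0, pvValuesB_eq base l hv []]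
  simp only [List.nil_append]
  rw [pvExpandB_eq, List.reverse_reverse, List.foldl_map]
  simp only [zero_add, one_mul]
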